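-- pv_equiv track=rewrite | github.com/whybe7/dummy.py | control.py | isUpperCase
-- ===== SOURCE A (Python) =====
-- def isUpperCase(sentence:str):
--     for c in range(len(sentence)):
--         if (sentence[c] >= 'a' and sentence[c] <= 'z') or (sentence[c] >= 'A' and sentence[c] <= 'Z'):
--             if sentence[c] >= 'A' and sentence[c] <= 'Z':
--                 checked = True
--             else:
--                 checked = False
--     return checked
-- ===== SOURCE B (Python) =====
-- def isUpperCase(sentence: str):
--     for c in reversed(sentence):
--         if ('a' <= c <= 'z') or ('A' <= c <= 'Z'):
--             return 'A' <= c <= 'Z'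
--     return False
-- ===== Notes on version B (the rewrite author's own statement) =====
-- stated objective: faster
-- what changed: B scans from the end and returns at the first ASCII letter instead of A's full forward scan that keeps overwriting a flag; on letterless input, where A raises UnboundLocalError, B returns False (excluded by Pre_).
import Mathlib
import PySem

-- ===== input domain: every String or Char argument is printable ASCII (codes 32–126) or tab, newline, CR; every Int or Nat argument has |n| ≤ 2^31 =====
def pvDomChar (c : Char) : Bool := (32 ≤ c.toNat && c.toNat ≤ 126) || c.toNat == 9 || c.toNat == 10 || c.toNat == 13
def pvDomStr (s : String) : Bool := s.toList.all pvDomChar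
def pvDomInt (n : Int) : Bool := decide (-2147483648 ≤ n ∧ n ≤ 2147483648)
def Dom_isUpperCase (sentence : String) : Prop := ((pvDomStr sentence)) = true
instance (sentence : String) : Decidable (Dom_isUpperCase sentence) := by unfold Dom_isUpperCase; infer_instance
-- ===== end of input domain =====

set_option maxRecDepth 16384


-- B scans from the end and returns at the first ASCII letter (A scans forward overwriting a flag);
-- on letterless strings A raises UnboundLocalError (excluded by Pre_) while B returns false.

-- shared character tests (the explicit ASCII range comparisons both Pythons write inline)
def pvLetterTest (c : Char) : Bool := ('a' ≤ c && c ≤ 'z') || ('A' ≤ c && c ≤ 'Z')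
def pvUpperTest (c : Char) : Bool := 'A' ≤ c && c ≤ 'Z'

-- ===== PORT A =====
-- loop body: the accumulator is `checked` (none = not yet assigned, mirrors the unbound local)
def isUpperCaseStepA (st : Option Bool) (c : Char) : Option Bool :=
  if pvLetterTest c then
    (if pvUpperTest c then some true else some false)
  else st

def isUpperCase (sentence : String) : Bool :=
  -- `.getD false` is only reached when `checked` was never assigned, i.e. outside Pre_ (Python raises there)
  (sentence.toList.foldl isUpperCaseStepA none).getD false

-- ===== PORT B =====
def isUpperCaseGoB : List Char → Bool
  | [] => false
  | c :: rest => if pvLetterTest c then pvUpperTest c else isUpperCaseGoB rest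

def isUpperCase_alt (sentence : String) : Bool :=
  isUpperCaseGoB sentence.toList.reverse

-- ===== PRECONDITION & SPEC =====
-- Pre_ excludes exactly the strings with no ASCII letter, on which A raises UnboundLocalError.
def Pre_isUpperCase (sentence : String) : Prop :=
  sentence.toList.any pvLetterTest = true
instance (sentence : String) : Decidable (Pre_isUpperCase sentence) := by
  unfold Pre_isUpperCase; infer_instance

def pvWitness_isUpperCase : String := "Ab"

def Spec_isUpperCase (sentence : String) (out : Bool) : Prop := out = isUpperCase_alt sentence
instance (sentence : String) (out : Bool) : Decidable (Spec_isUpperCase sentence out) := by unfold Spec_isUpperCase; infer_instance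

-- ===== CLAIM (what is proved, stated in full; the proofs are below) =====
def Claim_equal_isUpperCase : Prop := ∀ (sentence : String), Dom_isUpperCase sentence → Pre_isUpperCase sentence → Spec_isUpperCase sentence (isUpperCase sentence)

-- ===== LEMMAS AND PROOFS =====

theorem isUpperCase_key (l : List Char) (h : ∃ c ∈ l, pvLetterTest c = true) :
    List.foldl isUpperCaseStepA none l = some (isUpperCaseGoB l.reverse) := by
  induction l using List.reverseRecOn with
  | nil => simp at h
  | append_singleton l c ih =>
    rw [List.foldl_append, List.reverse_append]
    by_cases hc : pvLetterTest c = true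
    · simp [isUpperCaseStepA, isUpperCaseGoB, hc]
      split_ifs with hu <;> simp [hu]
    · have h' : ∃ x ∈ l, pvLetterTest x = true := by
        rcases h with ⟨x, hx, hpx⟩
        rcases List.mem_append.1 hx with hx' | hx'
        · exact ⟨x, hx', hpx⟩
        · simp at hx'; subst hx'; exact absurd hpx hc
      simp [isUpperCaseStepA, isUpperCaseGoB, hc, ih h']

-- ===== VERDICT (by name: the statement is the Claim_ definition above) =====
theorem isUpperCase_spec : Claim_equal_isUpperCase := by
  intro s _ hpre
  unfold Spec_isUpperCase isUpperCase isUpperCase_alt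
  rw [isUpperCase_key s.toList (List.any_eq_true.1 hpre)]
  rfl
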